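-- pv_equiv track=rewrite | github.com/MikosJon/PROG_STVARI | UPV/Objekti/permutacije.py | je_seznam_ciklov
-- ===== SOURCE A (Python) =====
-- def je_seznam_ciklov(seznam):
--     videne = set()
--     for cikel in seznam:
--         for stevilo in cikel:
--             if stevilo in videne or stevilo <= 0:
--                 return False
--             else:
--                 videne.add(stevilo)
--     return True
-- ===== SOURCE B (Python) =====
-- def je_seznam_ciklov(seznam):
--     nums = sorted(n for cikel in seznam for n in cikel)
--     if nums and nums[0] <= 0:
--         return False
--     return all(a < b for a, b in zip(nums, nums[1:]))
-- ===== Notes on version B (the rewrite author's own statement) =====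
-- stated objective: alternative
-- what changed: Replaces the seen-set single pass with a sort-then-scan algorithm: sort the flattened elements, positivity is just the head (minimum) check, and uniqueness is strict increase between adjacent sorted neighbours.
import Mathlib
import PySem

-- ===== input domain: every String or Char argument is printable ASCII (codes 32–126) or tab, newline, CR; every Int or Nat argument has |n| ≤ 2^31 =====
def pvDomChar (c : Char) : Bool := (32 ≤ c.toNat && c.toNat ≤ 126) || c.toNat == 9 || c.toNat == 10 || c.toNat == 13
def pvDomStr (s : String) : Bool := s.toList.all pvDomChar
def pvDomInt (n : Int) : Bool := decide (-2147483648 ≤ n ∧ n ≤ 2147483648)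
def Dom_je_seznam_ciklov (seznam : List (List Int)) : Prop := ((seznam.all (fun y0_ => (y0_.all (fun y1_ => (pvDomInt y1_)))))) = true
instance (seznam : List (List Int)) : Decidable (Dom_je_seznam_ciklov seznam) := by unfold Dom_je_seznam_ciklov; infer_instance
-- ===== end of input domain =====

-- B sorts the flattened elements and checks head positivity plus strict adjacent increase; same results, different (sort-then-scan) algorithm.

-- ===== PORT A =====
-- inner 'for stevilo in cikel' loop: none = early 'return False', some v = updated seen-set
def jscInner (videne : PySem.Set Int) : List Int → Option (PySem.Set Int)
  | [] => some videne
  | x :: xs =>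
      if PySem.Set.contains videne x || decide (x ≤ 0) then none
      else jscInner (PySem.Set.add videne x) xs

-- outer 'for cikel in seznam' loop
def jscOuter (videne : PySem.Set Int) : List (List Int) → Bool
  | [] => true
  | c :: cs =>
      match jscInner videne c with
      | none => false
      | some v => jscOuter v cs

def je_seznam_ciklov (seznam : List (List Int)) : Bool :=
  jscOuter PySem.Set.empty seznam

-- ===== PORT B =====
def je_seznam_ciklov_alt (seznam : List (List Int)) : Bool :=
  let nums := PySem.List.sorted (seznam.flatMap (fun cikel => cikel)) (fun n => n) false
  if (decide (nums ≠ [])) && (match nums with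
                              | [] => false
                              | x :: _ => decide (x ≤ 0)) then
    false
  else
    (nums.zip nums.tail).all (fun p => decide (p.1 < p.2))

-- ===== PRECONDITION & SPEC =====
def Spec_je_seznam_ciklov (seznam : List (List Int)) (out : Bool) : Prop := out = je_seznam_ciklov_alt seznam
instance (seznam : List (List Int)) (out : Bool) : Decidable (Spec_je_seznam_ciklov seznam out) := by unfold Spec_je_seznam_ciklov; infer_instance

-- ===== CLAIM (what is proved, stated in full; the proofs are below) =====
def Claim_equal_je_seznam_ciklov : Prop := ∀ (seznam : List (List Int)), Dom_je_seznam_ciklov seznam → Spec_je_seznam_ciklov seznam (je_seznam_ciklov seznam)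

-- ===== LEMMAS AND PROOFS =====

-- A's nested loops, flattened: one loop over the concatenation
def jscFlat (videne : PySem.Set Int) : List Int → Bool
  | [] => true
  | x :: xs =>
      if PySem.Set.contains videne x || decide (x ≤ 0) then false
      else jscFlat (PySem.Set.add videne x) xs

theorem jscFlat_append (v : PySem.Set Int) (c rest : List Int) :
    jscFlat v (c ++ rest) =
      (match jscInner v c with
       | none => false
       | some v' => jscFlat v' rest) := by
  induction c generalizing v with
  | nil => simp [jscInner]
  | cons x xs ih =>
      simp only [List.cons_append, jscFlat, jscInner]
      split_ifs with h
      · rfl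
      · exact ih _

theorem jscOuter_eq_flat (v : PySem.Set Int) (cs : List (List Int)) :
    jscOuter v cs = jscFlat v (cs.flatMap (fun c => c)) := by
  induction cs generalizing v with
  | nil => simp [jscOuter, jscFlat]
  | cons c cs ih =>
      simp only [List.flatMap_cons, jscOuter, jscFlat_append]
      cases h : jscInner v c with
      | none => rfl
      | some v' => exact ih v'

theorem jscFlat_iff (v : PySem.Set Int) (xs : List Int) :
    jscFlat v xs = true ↔ xs.Nodup ∧ ∀ n ∈ xs, 0 < n ∧ n ∉ v := by
  induction xs generalizing v with
  | nil => simp [jscFlat]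
  | cons x xs ih =>
      simp only [jscFlat]
      split_ifs with h
      · simp only [false_iff]
        rintro ⟨_, hall⟩
        rcases (hall x (by simp)) with ⟨hpos, hnv⟩
        rcases Bool.or_eq_true_iff.mp h with h' | h'
        · exact hnv ((PySem.Set.contains_iff _ _).mp h')
        · simp only [decide_eq_true_eq] at h'; omega
      · rw [ih]
        simp only [List.nodup_cons]
        constructor
        · rintro ⟨hnd, hall⟩
          have hx : ¬ (PySem.Set.contains v x = true) ∧ ¬ (x ≤ 0) := by
            constructor
            · intro hc; exact h (Bool.or_eq_true_iff.mpr (Or.inl hc))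
            · intro hc; exact h (Bool.or_eq_true_iff.mpr (Or.inr (decide_eq_true hc)))
          refine ⟨⟨?_, hnd⟩, ?_⟩
          · intro hmem
            rcases hall x (by simp [hmem]) with ⟨_, hnv⟩
            exact hnv (by simp [PySem.Set.mem_add])
          · intro n hn
            rcases List.mem_cons.mp hn with rfl | hn'
            · exact ⟨by omega, fun hmem => hx.1 ((PySem.Set.contains_iff _ _).mpr hmem)⟩
            · rcases hall n hn' with ⟨hpos, hnv⟩
              exact ⟨hpos, fun hmem => hnv (by simp [PySem.Set.mem_add, hmem])⟩
        · rintro ⟨⟨hxnot, hnd⟩, hall⟩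
          refine ⟨hnd, fun n hn => ?_⟩
          rcases hall n (by simp [hn]) with ⟨hpos, hnv⟩
          refine ⟨hpos, fun hmem => ?_⟩
          rcases (PySem.Set.mem_add _ _ _).mp hmem with hm | rfl
          · exact hnv hm
          · exact hxnot hn

-- zip-with-tail all-< is exactly Chain' (<)
theorem zip_tail_all_iff_chain' (l : List Int) :
    ((l.zip l.tail).all (fun p => decide (p.1 < p.2)) = true) ↔ l.IsChain (· < ·) := by
  induction l with
  | nil => simp
  | cons x xs ih =>
      cases xs with
      | nil => simp
      | cons y ys =>
          simp only [List.tail_cons, List.zip_cons_cons, List.all_cons, Bool.and_eq_true,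
            decide_eq_true_eq, List.isChain_cons_cons]
          rw [← ih]
          simp

theorem alt_iff (seznam : List (List Int)) :
    je_seznam_ciklov_alt seznam = true ↔
      (seznam.flatMap (fun c => c)).Nodup ∧ ∀ n ∈ seznam.flatMap (fun c => c), 0 < n := by
  unfold je_seznam_ciklov_alt
  set flat := seznam.flatMap (fun c => c) with hflat
  set nums := PySem.List.sorted flat (fun n => n) false with hnums
  have hperm : nums.Perm flat := PySem.List.sorted_perm _ _ _
  have hle : nums.Pairwise (fun a b => a ≤ b) := PySem.List.sorted_pairwise flat (fun n => n)
  cases hn : nums with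
  | nil =>
      have : flat = [] := by
        have := hperm; rw [hn] at this; exact this.symm.eq_nil.symm ▸ (List.Perm.nil_eq this).symm
      simp [this]
  | cons x t =>
      have hxmem : ∀ y ∈ flat, x ≤ y := by
        intro y hy
        exact PySem.List.key_head_sorted_le (xs := flat) (key := fun n => n) (by rw [← hnums, hn]) y hy
      have hxin : x ∈ flat := hperm.mem_iff.mp (by simp [hn])
      simp only [ne_eq, reduceCtorEq, not_false_eq_true, decide_true, Bool.true_and]
      split_ifs with h
      · -- x ≤ 0 : both sides false
        simp only [decide_eq_true_eq] at h
        simp only [false_iff]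
        rintro ⟨_, hall⟩
        have := hall x hxin
        omega
      · simp only [decide_eq_true_eq] at h
        have hxpos : 0 < x := by omega
        rw [← hn, zip_tail_all_iff_chain']
        have hchain : nums.IsChain (· < ·) ↔ nums.Pairwise (· < ·) :=
          List.isChain_iff_pairwise
        rw [hchain]
        constructor
        · intro hp
          refine ⟨hperm.nodup_iff.mp hp.nodup, fun n hnmem => lt_of_lt_of_le hxpos (hxmem n hnmem)⟩
        · rintro ⟨hnd, _⟩
          have hnd' : nums.Nodup := hperm.nodup_iff.mpr hnd
          exact (List.Pairwise.and hle hnd').imp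
            (fun {a b} hab => lt_of_le_of_ne hab.1 hab.2)

-- ===== VERDICT (by name: the statement is the Claim_ definition above) =====
theorem je_seznam_ciklov_spec : Claim_equal_je_seznam_ciklov := by
  intro seznam _
  unfold Spec_je_seznam_ciklov
  rw [Bool.eq_iff_iff]
  rw [alt_iff]
  unfold je_seznam_ciklov
  rw [jscOuter_eq_flat, jscFlat_iff]
  simp [PySem.Set.empty]
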